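-- pv_equiv track=rewrite | github.com/DucHai972/Q_Benchmark | generate_mental_health_respondent_count.py | decode_mcq_answer
-- ===== SOURCE A (Python) =====
-- def decode_mcq_answer(feature, coded_answer, questions_schema):
--     """Decode MCQ answer from coded value to human-readable text."""
--     if feature not in questions_schema:
--         return str(coded_answer)
--
--     question_text = questions_schema[feature]
--
--     if '[MCQ:' not in question_text:
--         return str(coded_answer)
--
--     # Extract MCQ options
--     mcq_part = question_text.split('[MCQ:')[1].split(']')[0]
--     options = {}
--
--     # Parse options like "1. Option1 2. Option2"
--     parts = mcq_part.strip().split(' ')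
--     current_key = None
--     current_value = []
--
--     for part in parts:
--         if part and len(part) > 1 and part[1] == '.':
--             if current_key:
--                 options[current_key] = ' '.join(current_value)
--             current_key = part[0]
--             current_value = [part[2:]] if len(part) > 2 else []
--         else:
--             current_value.append(part)
--
--     if current_key:
--         options[current_key] = ' '.join(current_value)
--
--     return options.get(str(int(coded_answer)), str(coded_answer))
-- ===== SOURCE B (Python) =====
-- def _is_marker(p):
--     return bool(p) and len(p) > 1 and p[1] == '.'
--
--
-- def decode_mcq_answer(feature, coded_answer, questions_schema):
--     """Decode MCQ answer from coded value to human-readable text."""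
--     question_text = questions_schema.get(feature)
--     if question_text is None:
--         return str(coded_answer)
--
--     if '[MCQ:' not in question_text:
--         return str(coded_answer)
--
--     mcq_part = question_text.split('[MCQ:')[1].split(']')[0]
--     parts = mcq_part.strip().split(' ')
--     target = str(int(coded_answer))
--
--     # Scan marker-delimited groups with takeWhile/dropWhile-style slicing;
--     # the LAST group whose key equals the target wins, so keep overwriting.
--     result = str(coded_answer)
--     rest = parts
--     while rest:
--         p = rest[0]
--         rest = rest[1:]
--         if _is_marker(p):
--             k = 0
--             while k < len(rest) and not _is_marker(rest[k]):
--                 k += 1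
--             if p[0] == target:
--                 result = ' '.join(([p[2:]] if len(p) > 2 else []) + rest[:k])
--             rest = rest[k:]
--     return result
-- ===== Notes on version B (the rewrite author's own statement) =====
-- stated objective: alternative
-- what changed: Replaces A's single token fold that accumulates a key/value dict (pending key + value buffer, final flush, dict lookup) with a recursive marker-group scan: each marker's value tokens are taken by takeWhile/dropWhile slicing and a single 'last matching group' string accumulator replaces the dict entirely; Pre_ excludes only the inputs where int(coded_answer) raises ValueError in A (B raises there too).
import Mathlib
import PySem

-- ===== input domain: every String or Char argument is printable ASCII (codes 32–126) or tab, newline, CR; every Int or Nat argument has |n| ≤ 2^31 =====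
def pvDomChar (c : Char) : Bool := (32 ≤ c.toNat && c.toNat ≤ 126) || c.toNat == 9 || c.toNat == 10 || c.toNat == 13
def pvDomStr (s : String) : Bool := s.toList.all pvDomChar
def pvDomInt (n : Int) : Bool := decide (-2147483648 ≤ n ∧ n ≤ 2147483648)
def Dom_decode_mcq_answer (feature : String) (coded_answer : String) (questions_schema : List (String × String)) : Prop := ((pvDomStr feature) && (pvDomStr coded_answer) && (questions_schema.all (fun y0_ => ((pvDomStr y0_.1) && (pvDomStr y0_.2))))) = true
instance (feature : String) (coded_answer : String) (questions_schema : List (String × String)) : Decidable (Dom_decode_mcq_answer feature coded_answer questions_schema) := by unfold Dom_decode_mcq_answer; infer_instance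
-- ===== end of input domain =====

-- B replaces A's dict-accumulating token fold by a recursive marker-group scan with a single
-- last-match accumulator (alternative decomposition, same cost); Pre_ excludes only the inputs
-- where A's int(coded_answer) raises ValueError.


-- ===== PORT A =====
-- the body of A's `for part in parts:` loop, lifted to a named step function
def pvStepA (st : PySem.Dict String String × Option String × List String) (part : String) :
    PySem.Dict String String × Option String × List String :=
  if part ≠ "" ∧ 1 < PySem.Str.len part ∧ part.toList[1]? = some '.' then
    let options := match st.2.1 with
      | some k => st.1.insert k (PySem.Str.join " " st.2.2)
      | none => st.1
    (options, some (String.mk (part.toList.take 1)),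
      if 2 < PySem.Str.len part then [PySem.Str.slice part (some 2) none] else [])
  else
    (st.1, st.2.1, st.2.2 ++ [part])

-- A's trailing `if current_key: options[current_key] = ...` flush followed by
-- `options.get(target, default)`, as a function of the loop state
def pvFinal (t c : String) (st : PySem.Dict String String × Option String × List String) : String :=
  (match st.2.1 with
    | some k => st.1.insert k (PySem.Str.join " " st.2.2)
    | none => st.1).getD t c

-- mcq_part.strip().split(' ') where mcq_part = q.split('[MCQ:')[1].split(']')[0]
def pvPartsA (q : String) : List String :=
  (PySem.Str.split? (PySem.Str.strip
    (((PySem.Str.split? (((PySem.Str.split? q "[MCQ:").getD [])[1]?.getD "") "]").getD []).headD "")) " ").getD []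

def decode_mcq_answer (feature : String) (coded_answer : String) (questions_schema : List (String × String)) : String :=
  if (questions_schema.find? (fun kv => kv.1 == feature)).isSome = false then coded_answer
  else if PySem.Str.isIn "[MCQ:"
      (((questions_schema.find? (fun kv => kv.1 == feature)).map (·.2)).getD "") = false then coded_answer
  else
    match PySem.Int.ofStr? coded_answer with
    | none => ""   -- unreachable under Pre_: Python raises ValueError from int() here
    | some n =>
      pvFinal (PySem.Int.toStr n) coded_answer
        ((pvPartsA (((questions_schema.find? (fun kv => kv.1 == feature)).map (·.2)).getD "")).foldl
          pvStepA (PySem.Dict.empty, none, []))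

-- ===== PORT B =====
def pvIsMarker (p : String) : Bool :=
  !(p == "") && decide (1 < PySem.Str.len p) && (p.toList[1]? == some '.')

-- the group scan of Source B: consume one marker and its following non-marker tokens per step
def pvScan (target : String) (acc : String) : List String → String
  | [] => acc
  | p :: rest =>
    if pvIsMarker p then
      let grp := rest.takeWhile (fun q => !pvIsMarker q)
      let acc' :=
        if String.mk (p.toList.take 1) == target then
          PySem.Str.join " "
            ((if 2 < PySem.Str.len p then [PySem.Str.slice p (some 2) none] else []) ++ grp)
        else acc
      pvScan target acc' (rest.dropWhile (fun q => !pvIsMarker q))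
    else pvScan target acc rest
termination_by l => l.length
decreasing_by
  · simpa using Nat.lt_succ_of_le (List.length_dropWhile_le _ _)
  · simp

def decode_mcq_answer_alt (feature : String) (coded_answer : String) (questions_schema : List (String × String)) : String :=
  match questions_schema.find? (fun kv => kv.1 == feature) with
  | none => coded_answer
  | some kv =>
    if PySem.Str.isIn "[MCQ:" kv.2 then
      match PySem.Int.ofStr? coded_answer with
      | none => coded_answer   -- unreachable under Pre_: Python raises ValueError from int() here
      | some n =>
        pvScan (PySem.Int.toStr n) coded_answer
          ((PySem.Str.split? (PySem.Str.strip
            (((PySem.Str.split? (((PySem.Str.split? kv.2 "[MCQ:").getD [])[1]?.getD "") "]").getD []).headD "")) " ").getD [])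
    else coded_answer

-- ===== PRECONDITION & SPEC =====
-- Pre_ excludes exactly the inputs on which A raises ValueError: the feature's question text
-- contains '[MCQ:' but coded_answer is not accepted by int().
def Pre_decode_mcq_answer (feature : String) (coded_answer : String) (questions_schema : List (String × String)) : Prop :=
  (match questions_schema.find? (fun kv => kv.1 == feature) with
   | none => true
   | some kv => !PySem.Str.isIn "[MCQ:" kv.2 || (PySem.Int.ofStr? coded_answer).isSome) = true
instance (feature : String) (coded_answer : String) (questions_schema : List (String × String)) : Decidable (Pre_decode_mcq_answer feature coded_answer questions_schema) := by unfold Pre_decode_mcq_answer; infer_instance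

def pvWitness_decode_mcq_answer : String × String × (List (String × String)) :=
  ("q1", "2", [("q1", "Count [MCQ: 1. Yes 2. No]")])

def Spec_decode_mcq_answer (feature : String) (coded_answer : String) (questions_schema : List (String × String)) (out : String) : Prop := out = decode_mcq_answer_alt feature coded_answer questions_schema
instance (feature : String) (coded_answer : String) (questions_schema : List (String × String)) (out : String) : Decidable (Spec_decode_mcq_answer feature coded_answer questions_schema out) := by unfold Spec_decode_mcq_answer; infer_instance

-- ===== CLAIM (what is proved, stated in full; the proofs are below) =====
def Claim_equal_decode_mcq_answer : Prop := ∀ (feature : String) (coded_answer : String) (questions_schema : List (String × String)), Dom_decode_mcq_answer feature coded_answer questions_schema → Pre_decode_mcq_answer feature coded_answer questions_schema → Spec_decode_mcq_answer feature coded_answer questions_schema (decode_mcq_answer feature coded_answer questions_schema)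

-- ===== LEMMAS AND PROOFS =====

theorem pvMarker_iff (p : String) :
    (p ≠ "" ∧ 1 < PySem.Str.len p ∧ p.toList[1]? = some '.') ↔ pvIsMarker p = true := by
  simp [pvIsMarker, and_assoc]

theorem pvFold_nonmarkers :
    ∀ (grp : List String), (∀ q ∈ grp, pvIsMarker q = false) →
    ∀ (d : PySem.Dict String String) (k : Option String) (v : List String),
    grp.foldl pvStepA (d, k, v) = (d, k, v ++ grp) := by
  intro grp
  induction grp with
  | nil => intro _ d k v; simp
  | cons q grp ih =>
    intro h d k v
    have hq : pvIsMarker q = false := h q (by simp)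
    have hnq : ¬ (q ≠ "" ∧ 1 < PySem.Str.len q ∧ q.toList[1]? = some '.') := by
      rw [pvMarker_iff]; simp [hq]
    simp only [List.foldl_cons, pvStepA, if_neg hnq]
    rw [ih (fun x hx => h x (by simp [hx]))]
    simp

theorem pvAcc_insert (t c : String) (d : PySem.Dict String String) (k x : String) :
    (d.insert k x).getD t c = if (k == t) = true then x else d.getD t c := by
  rw [PySem.Dict.getD_insert]
  by_cases h : k = t
  · simp [h]
  · have h2 : ¬ t = k := fun e => h e.symm
    simp [h, h2]

theorem pvJoin_group_fuel (t c : String) :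
    ∀ (n : Nat) (parts : List String), parts.length ≤ n →
    ∀ (d : PySem.Dict String String) (k : String) (v : List String),
    pvFinal t c (parts.foldl pvStepA (d, some k, v)) =
      pvScan t ((d.insert k (PySem.Str.join " "
          (v ++ parts.takeWhile (fun q => !pvIsMarker q)))).getD t c)
        (parts.dropWhile (fun q => !pvIsMarker q)) := by
  intro n
  induction n with
  | zero =>
    intro parts hn d k v
    have : parts = [] := List.eq_nil_of_length_eq_zero (Nat.le_zero.mp hn)
    subst this
    simp [pvScan, pvFinal]
  | succ m ih =>
    intro parts hn d k v
    have htake : ∀ q ∈ parts.takeWhile (fun q => !pvIsMarker q), pvIsMarker q = false := by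
      intro q hq
      have := List.mem_takeWhile_imp hq
      simpa using this
    have hfold : parts.foldl pvStepA (d, some k, v) =
        (parts.dropWhile (fun q => !pvIsMarker q)).foldl pvStepA
          (d, some k, v ++ parts.takeWhile (fun q => !pvIsMarker q)) := by
      conv_lhs => rw [← List.takeWhile_append_dropWhile (p := fun q => !pvIsMarker q) (l := parts)]
      rw [List.foldl_append, pvFold_nonmarkers _ htake]
    rw [hfold]
    cases hdrop : parts.dropWhile (fun q => !pvIsMarker q) with
    | nil => simp [pvScan, pvFinal]
    | cons p rest =>
      have hp : pvIsMarker p = true := by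
        have := List.head?_dropWhile_not (fun q => !pvIsMarker q) parts
        rw [hdrop] at this; simpa using this
      have hpProp : p ≠ "" ∧ 1 < PySem.Str.len p ∧ p.toList[1]? = some '.' :=
        (pvMarker_iff p).mpr hp
      have hlen : rest.length ≤ m := by
        have h1 := congrArg List.length (List.takeWhile_append_dropWhile
          (p := fun q => !pvIsMarker q) (l := parts))
        rw [hdrop] at h1
        simp at h1
        omega
      simp only [List.foldl_cons, pvStepA, if_pos hpProp]
      rw [ih rest hlen]
      rw [pvScan, if_pos hp]
      rw [pvAcc_insert]

theorem pvJoin_group (t c : String) (parts : List String)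
    (d : PySem.Dict String String) (k : String) (v : List String) :
    pvFinal t c (parts.foldl pvStepA (d, some k, v)) =
      pvScan t ((d.insert k (PySem.Str.join " "
          (v ++ parts.takeWhile (fun q => !pvIsMarker q)))).getD t c)
        (parts.dropWhile (fun q => !pvIsMarker q)) :=
  pvJoin_group_fuel t c parts.length parts (Nat.le_refl _) d k v

theorem pvScan_none (t c : String) :
    ∀ (parts : List String) (d : PySem.Dict String String) (v : List String),
    pvFinal t c (parts.foldl pvStepA (d, none, v)) = pvScan t (d.getD t c) parts := by
  intro parts
  induction parts with
  | nil => intro d v; simp [pvFinal, pvScan]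
  | cons p rest ih =>
    intro d v
    by_cases hp : pvIsMarker p = true
    · have hpProp : p ≠ "" ∧ 1 < PySem.Str.len p ∧ p.toList[1]? = some '.' :=
        (pvMarker_iff p).mpr hp
      simp only [List.foldl_cons, pvStepA, if_pos hpProp]
      rw [pvJoin_group, pvScan, if_pos hp, pvAcc_insert]
    · have hnp : ¬ (p ≠ "" ∧ 1 < PySem.Str.len p ∧ p.toList[1]? = some '.') := by
        rw [pvMarker_iff]; simp [hp]
      simp only [List.foldl_cons, pvStepA, if_neg hnp]
      rw [ih, pvScan, if_neg hp]

-- ===== VERDICT (by name: the statement is the Claim_ definition above) =====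
theorem decode_mcq_answer_spec : Claim_equal_decode_mcq_answer := by
  intro feature coded_answer qs _ hPre
  unfold Spec_decode_mcq_answer decode_mcq_answer decode_mcq_answer_alt
  unfold Pre_decode_mcq_answer at hPre
  cases hf : qs.find? (fun kv => kv.1 == feature) with
  | none => rfl
  | some kv =>
    rw [hf] at hPre
    simp only [Option.isSome_some, Option.map_some, Option.getD_some]
    cases h2 : PySem.Str.isIn "[MCQ:" kv.2 with
    | false => rfl
    | true =>
      cases h3 : PySem.Int.ofStr? coded_answer with
      | none =>
        exfalso
        simp [h3] at hPre
        simp [hPre] at h2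
      | some n =>
        show pvFinal (PySem.Int.toStr n) coded_answer
            ((pvPartsA kv.2).foldl pvStepA (PySem.Dict.empty, none, [])) =
          pvScan (PySem.Int.toStr n) coded_answer
            ((PySem.Str.split? (PySem.Str.strip
              (((PySem.Str.split? (((PySem.Str.split? kv.2 "[MCQ:").getD [])[1]?.getD "") "]").getD []).headD "")) " ").getD [])
        rw [pvScan_none, PySem.Dict.getD_empty, pvPartsA]
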